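-- pv_equiv track=rewrite | github.com/dabelt-msft/algorithms_datastructures_python | gen.py | new_gen
-- ===== SOURCE A (Python) =====
-- def new_gen(iterable):
--     counter = -1
--     for item in iterable:
--         if item > 6:
--             return
--         counter += 1
--         if counter % 2 != 0:
--             continue
--         else:
--             yield item
-- ===== SOURCE B (Python) =====
-- def new_gen(iterable):
--     items = list(iterable)
--     cut = next((i for i, x in enumerate(items) if x > 6), len(items))
--     yield from items[:cut][::2]
-- ===== Notes on version B (the rewrite author's own statement) =====
-- stated objective: alternative
-- what changed: B replaces A's streaming counter/early-return loop with three staged bulk operations: materialize the input, locate the cut position (first index with item > 6, else the length), then emit the extended slice items[:cut][::2]; no per-element parity state is kept.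
import Mathlib
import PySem

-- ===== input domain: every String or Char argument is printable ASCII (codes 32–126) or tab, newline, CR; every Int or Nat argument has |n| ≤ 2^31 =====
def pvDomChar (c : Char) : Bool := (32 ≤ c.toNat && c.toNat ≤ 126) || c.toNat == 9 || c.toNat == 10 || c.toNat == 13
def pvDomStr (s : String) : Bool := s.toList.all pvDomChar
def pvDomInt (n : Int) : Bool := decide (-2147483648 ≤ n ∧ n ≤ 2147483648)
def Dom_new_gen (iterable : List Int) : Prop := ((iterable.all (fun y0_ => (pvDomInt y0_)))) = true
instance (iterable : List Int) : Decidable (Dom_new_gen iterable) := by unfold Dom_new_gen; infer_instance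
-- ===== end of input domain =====

-- One honest line: B stages the work — find the cut index, then take the extended slice [:cut][::2] — instead of A's counter loop (alternative).
-- ===== PORT A =====
-- counter/early-return loop of A, step for step; counter % 2 via PySem.Int.mod
def new_gen_go (counter : Int) : List Int → List Int
  | [] => []
  | item :: rest =>
    if item > 6 then []
    else
      let c := counter + 1
      if PySem.Int.mod c 2 ≠ 0 then new_gen_go c rest
      else item :: new_gen_go c rest

def new_gen (iterable : List Int) : List Int := new_gen_go (-1) iterable

-- ===== PORT B =====
-- cut = next((i for i, x in enumerate(items) if x > 6), len(items)); then items[:cut][::2].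
-- [::2] is PySem.List.slice? with step 2 (≠ 0, so it returns some; .getD [] only discharges the Option)
def new_gen_alt (iterable : List Int) : List Int :=
  let items := iterable
  let cut : Int :=
    ((((PySem.List.enumerate items 0).find? (fun p => decide (p.2 > 6))).map (·.1)).getD
      (items.length : Int))
  (PySem.List.slice? (PySem.List.slice items none (some cut)) none none 2).getD []

-- ===== PRECONDITION & SPEC =====
def Spec_new_gen (iterable : List Int) (out : List Int) : Prop := out = new_gen_alt iterable
instance (iterable : List Int) (out : List Int) : Decidable (Spec_new_gen iterable out) := by unfold Spec_new_gen; infer_instance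

-- ===== CLAIM (what is proved, stated in full; the proofs are below) =====
def Claim_equal_new_gen : Prop := ∀ (iterable : List Int), Dom_new_gen iterable → Spec_new_gen iterable (new_gen iterable)

-- ===== LEMMAS AND PROOFS =====

-- every-second-element of a list, the common normal form both sides are reduced to
def pvStep2 : List Int → List Int
  | [] => []
  | [x] => [x]
  | x :: _ :: rest => x :: pvStep2 rest

-- skip-one variant, for the odd-counter state of A's loop
def pvStep2' : List Int → List Int
  | [] => []
  | _ :: rest => pvStep2 rest

theorem go_eq : ∀ (xs : List Int) (c : Int),
    new_gen_go c xs = (if (c+1) % 2 = 0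
      then pvStep2 (xs.takeWhile (fun x => !(x > 6)))
      else pvStep2' (xs.takeWhile (fun x => !(x > 6)))) := by
  intro xs
  induction xs with
  | nil => intro c; simp only [new_gen_go, List.takeWhile]; split <;> rfl
  | cons x rest ih =>
    intro c
    by_cases hx : x > 6
    · simp only [new_gen_go, if_pos hx, List.takeWhile, decide_eq_true hx,
        Bool.not_true]
      split <;> rfl
    · have hm : PySem.Int.mod (c+1) 2 = (c+1) % 2 :=
        PySem.Int.mod_eq_emod_of_pos (by omega)
      have hx' : (!decide (x > 6)) = true := by simp [hx]
      simp only [new_gen_go, if_neg hx, List.takeWhile, hx', hm]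
      rw [ih (c+1)]
      rcases Int.emod_two_eq_zero_or_one (c+1) with h | h
      · have h2 : (c+1+1) % 2 = 1 := by omega
        simp only [h, h2]
        norm_num
        cases hh : rest.takeWhile (fun x => !decide (x > 6)) with
        | nil => simp [pvStep2, pvStep2']
        | cons y ys => simp [pvStep2, pvStep2']
      · have h2 : (c+1+1) % 2 = 0 := by omega
        simp only [h, h2]
        norm_num [pvStep2, pvStep2']

-- the generator-expression cut index is s + length of the ≤6 prefix
theorem find_cut : ∀ (xs : List Int) (s : Int),
    ((((PySem.List.enumerate xs s).find? (fun p => decide (p.2 > 6))).map (·.1)).getD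
      (s + (xs.length : Int)))
    = s + ((xs.takeWhile (fun x => !decide (x > 6))).length : Int) := by
  intro xs
  induction xs with
  | nil => intro s; simp [PySem.List.enumerate]
  | cons x rest ih =>
    intro s
    by_cases hx : x > 6
    · simp [PySem.List.enumerate_cons, hx, List.takeWhile]
    · have ih' := ih (s+1)
      simp only [PySem.List.enumerate_cons, List.find?_cons, List.takeWhile,
        List.length_cons]
      have hpx : decide ((x : Int) > 6) = false := by simp [hx]
      rw [hpx]
      simp only [Bool.not_false, List.length_cons]
      have hdef : (s + ((rest.length + 1 : Nat) : Int)) = (s + 1) + (rest.length : Int) := by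
        push_cast; ring
      rw [hdef, ih']
      push_cast; ring

-- padded every-second extraction: extra indices beyond the length vanish
theorem filterMap_step2 : ∀ (l : List Int) (m : Nat), l.length ≤ 2 * m →
    List.filterMap (fun k : Nat => l[2 * k]?) (List.range m) = pvStep2 l := by
  intro l
  induction l using pvStep2.induct with
  | case1 => intro m _; simp [pvStep2]
  | case2 x =>
    intro m hm
    obtain ⟨m', rfl⟩ : ∃ m', m = m' + 1 := ⟨m - 1, by simp at hm; omega⟩
    rw [List.range_succ_eq_map, List.filterMap_cons, List.filterMap_map]
    simp [pvStep2]
  | case3 x y rest ih =>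
    intro m hm
    obtain ⟨m', rfl⟩ : ∃ m', m = m' + 1 := ⟨m - 1, by simp at hm; omega⟩
    rw [List.range_succ_eq_map, List.filterMap_cons, List.filterMap_map]
    have h2 : ∀ k : Nat, (x :: y :: rest)[2 * (k + 1)]? = rest[2 * k]? := by
      intro k
      have : 2 * (k + 1) = 2 * k + 1 + 1 := by omega
      simp [this]
    have := ih m' (by simp at hm ⊢; omega)
    simp only [Function.comp_def, h2]
    simp [pvStep2, this]

-- the extended slice [::2] is pvStep2
theorem slice2_eq (l : List Int) :
    (PySem.List.slice? l none none 2).getD [] = pvStep2 l := by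
  have h0 : PySem.List.sliceIndices l.length none none 2 = (0, (l.length : Int), 2) := by
    simp [PySem.List.sliceIndices]
  rw [PySem.List.slice?]
  simp only [h0]
  norm_num
  by_cases hl : 0 < l.length
  · have hcnt : ((((l.length : Int) + 2 - 1) / 2).toNat) = (l.length + 1) / 2 := by
      omega
    rw [if_pos hl, hcnt]
    have hfun : (fun k : Nat => l[(2 * (k : Int)).toNat]?) = (fun k : Nat => l[2 * k]?) := by
      funext k
      have hk : ((2 * (k : Int)).toNat) = 2 * k := by omega
      rw [hk]
    rw [hfun]
    exact filterMap_step2 l _ (by omega)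
  · have : l = [] := by
      cases l with
      | nil => rfl
      | cons a t => simp at hl
    subst this
    simp [pvStep2]

-- take of the takeWhile-length is takeWhile
theorem take_length_takeWhile (l : List Int) (p : Int → Bool) :
    l.take (l.takeWhile p).length = l.takeWhile p := by
  induction l with
  | nil => rfl
  | cons x rest ih =>
    by_cases hx : p x = true
    · simp [List.takeWhile, hx, ih]
    · simp [List.takeWhile, hx]

theorem alt_eq (xs : List Int) :
    new_gen_alt xs = pvStep2 (xs.takeWhile (fun x => !decide (x > 6))) := by
  unfold new_gen_alt
  have hc := find_cut xs 0
  rw [zero_add] at hc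
  simp only [hc, zero_add]
  rw [PySem.List.slice_to xs (Int.natCast_nonneg _)]
  rw [Int.toNat_natCast]
  rw [take_length_takeWhile]
  exact slice2_eq _

-- ===== VERDICT =====
theorem new_gen_spec : Claim_equal_new_gen := by
  intro xs _
  unfold Spec_new_gen new_gen
  rw [go_eq, alt_eq]
  norm_num
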